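-- pv_equiv track=rewrite | github.com/austral-prog/tp-6-loops-miamisson | enumerate_list.py | enumerate_list
-- ===== SOURCE A (Python) =====
-- def enumerate_list(lst):
--     """
--     Dada una lista de strings, retorna una nueva lista donde cada elemento
--     tiene el formato "indice. valor". Los strings vacios se deben saltear
--     y no deben aparecer en la lista resultante.
--     El indice debe ser consecutivo (no el indice original).
--
--     Ejemplo: enumerate_list(["Red", "Green", "", "White"]) -> ["0. Red", "1. Green", "2. White"]
--     """
--     nueva_lista = []
--     indice = 0
--     for i in range(0, len(lst)):
--         if lst[i] != "":
--             nueva_lista.append(f"{indice}. {lst[i]}")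
--             indice = indice + 1
--
--     return nueva_lista
-- ===== SOURCE B (Python) =====
-- def enumerate_list(lst):
--     # Back-to-front construction: the number of non-empty strings is known up
--     # front (len minus count of ""), so walk the list in REVERSE with a
--     # decrementing index, then reverse the accumulated output once.
--     k = len(lst) - lst.count("")
--     out = []
--     for x in reversed(lst):
--         if x != "":
--             k -= 1
--             out.append(f"{k}. {x}")
--     out.reverse()
--     return out
-- ===== Notes on version B (the rewrite author's own statement) =====
-- stated objective: alternative
-- what changed: Instead of a forward loop with an incrementing counter, B computes the number of non-empty strings up front via len/count, traverses the list in reverse assigning indices by decrement, and builds the output back-to-front, reversing it once at the end.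
import Mathlib
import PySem

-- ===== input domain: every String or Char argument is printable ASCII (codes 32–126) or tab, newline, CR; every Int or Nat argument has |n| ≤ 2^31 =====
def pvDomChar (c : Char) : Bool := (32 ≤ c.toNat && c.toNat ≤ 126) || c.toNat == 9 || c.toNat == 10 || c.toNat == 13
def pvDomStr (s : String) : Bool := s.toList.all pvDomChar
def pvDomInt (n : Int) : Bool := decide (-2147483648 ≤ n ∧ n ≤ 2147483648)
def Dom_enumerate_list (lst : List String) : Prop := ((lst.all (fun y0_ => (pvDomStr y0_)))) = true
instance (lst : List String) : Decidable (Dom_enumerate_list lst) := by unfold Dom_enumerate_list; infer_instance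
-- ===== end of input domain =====

-- B (alternative, same cost): computes the non-empty count up front (len - count("")),
-- traverses the list in reverse with a decrementing index, and builds the output
-- back-to-front, reversing it once at the end.


-- ===== PORT A =====
def enumerate_list (lst : List String) : List String :=
  (((PySem.List.pyRange 0 lst.length 1).foldl
      (fun (st : List String × Int) i =>
        if PySem.List.pyGetD lst i "" ≠ "" then
          (st.1 ++ [PySem.Int.toStr st.2 ++ ". " ++ PySem.List.pyGetD lst i ""], st.2 + 1)
        else st)
      ([], 0)) : List String × Int).1

-- ===== PORT B =====
def enumerate_list_alt (lst : List String) : List String :=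
  let k0 : Int := (lst.length : Int) - (PySem.List.count lst "" : Int)
  let st := lst.reverse.foldl
      (fun (st : Int × List String) x =>
        if x ≠ "" then (st.1 - 1, st.2 ++ [PySem.Int.toStr (st.1 - 1) ++ ". " ++ x]) else st)
      (k0, [])
  st.2.reverse

-- ===== PRECONDITION & SPEC =====
def Spec_enumerate_list (lst : List String) (out : List String) : Prop := out = enumerate_list_alt lst
instance (lst : List String) (out : List String) : Decidable (Spec_enumerate_list lst out) := by unfold Spec_enumerate_list; infer_instance

-- ===== CLAIM (what is proved, stated in full; the proofs are below) =====
def Claim_equal_enumerate_list : Prop := ∀ (lst : List String), Dom_enumerate_list lst → Spec_enumerate_list lst (enumerate_list lst)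

-- ===== LEMMAS AND PROOFS =====

-- the common normal form both loops reach
def pvFmt (p : Int × String) : String := PySem.Int.toStr p.1 ++ ". " ++ p.2

theorem enumerate_list_loopA (xs : List String) (acc : List String) (i : Int) :
    (xs.foldl
      (fun (st : List String × Int) x =>
        if x ≠ "" then (st.1 ++ [PySem.Int.toStr st.2 ++ ". " ++ x], st.2 + 1) else st)
      (acc, i))
    = (acc ++ (PySem.List.enumerate (xs.filter (fun x => x ≠ "")) i).map pvFmt,
       i + (xs.filter (fun x => x ≠ "")).length) := by
  induction xs generalizing acc i with
  | nil => simp [PySem.List.enumerate_nil]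
  | cons x xs ih =>
    by_cases hx : x = ""
    · simpa [hx] using ih acc i
    · rw [List.foldl_cons, if_pos (by simpa using hx)]
      rw [ih]
      simp [hx, PySem.List.enumerate_cons, pvFmt]
      omega

theorem enumerate_list_loopB (xs : List String) (acc : List String) (k : Int) :
    (xs.foldl
      (fun (st : Int × List String) x =>
        if x ≠ "" then (st.1 - 1, st.2 ++ [PySem.Int.toStr (st.1 - 1) ++ ". " ++ x]) else st)
      (k, acc))
    = (k - (xs.filter (fun x => x ≠ "")).length,
       acc ++ ((PySem.List.enumerate ((xs.filter (fun x => x ≠ "")).reverse)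
                  (k - (xs.filter (fun x => x ≠ "")).length)).map pvFmt).reverse) := by
  induction xs generalizing acc k with
  | nil => simp [PySem.List.enumerate_nil]
  | cons x xs ih =>
    by_cases hx : x = ""
    · simpa [hx] using ih acc k
    · rw [List.foldl_cons, if_pos (by simpa using hx)]
      rw [ih]
      simp [hx, PySem.List.enumerate_append, PySem.List.enumerate_cons,
            PySem.List.enumerate_nil, pvFmt]
      ring_nf
      simp

theorem count_empty_filter (lst : List String) :
    ((lst.length : Int)) - (PySem.List.count lst "" : Int)
      = ((lst.filter (fun x => x ≠ "")).length : Int) := by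
  induction lst with
  | nil => simp [PySem.List.count]
  | cons x xs ih =>
    by_cases hx : x = "" <;>
      simp [PySem.List.count, hx] at ih ⊢ <;> omega

-- ===== VERDICT (by name: the statement is the Claim_ definition above) =====
theorem enumerate_list_spec : Claim_equal_enumerate_list := by
  intro lst _
  show enumerate_list lst = enumerate_list_alt lst
  unfold enumerate_list enumerate_list_alt
  rw [PySem.List.foldl_pyRange_zero_pyGetD' lst ""
        (fun (st : List String × Int) x =>
          if x ≠ "" then (st.1 ++ [PySem.Int.toStr st.2 ++ ". " ++ x], st.2 + 1) else st)
        ([], 0)]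
  rw [enumerate_list_loopA]
  simp only [count_empty_filter]
  rw [enumerate_list_loopB]
  simp [List.filter_reverse]
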